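-- pv_equiv track=rewrite | github.com/kevinveenbirkenbach/infinito-nexus | cli/meta/networks/suggest/__main__.py | smallest_prefix
-- ===== SOURCE A (Python) =====
-- from typing import Iterable, List, Optional, Tuple
--
-- _PREFIX_THRESHOLDS: Tuple[Tuple[int, int], ...] = (
--     (2, 30),
--     (6, 29),
--     (14, 28),
--     (30, 27),
--     (62, 26),
--     (126, 25),
--     (254, 24),
--     (510, 23),
--     (1022, 22),
--     (2046, 21),
--     (4094, 20),
-- )
--
-- def smallest_prefix(clients: int) -> int:
--     if clients < 1:
--         raise SystemExit("--clients must be >= 1")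
--     for max_clients, prefix in _PREFIX_THRESHOLDS:
--         if clients <= max_clients:
--             return prefix
--     raise SystemExit(
--         f"--clients {clients} exceeds the largest supported prefix; "
--         f"pass --block <cidr> to bootstrap a new umbrella block manually."
--     )
-- ===== SOURCE B (Python) =====
-- def smallest_prefix(clients: int) -> int:
--     if clients < 1:
--         raise SystemExit("--clients must be >= 1")
--     prefix = 32 - (clients + 1).bit_length()
--     if prefix < 20:
--         raise SystemExit(
--             f"--clients {clients} exceeds the largest supported prefix; "
--             f"pass --block <cidr> to bootstrap a new umbrella block manually."
--         )
--     return prefix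
-- ===== Notes on version B (the rewrite author's own statement) =====
-- stated objective: simpler
-- what changed: Replaces the linear scan over the threshold table with a closed-form bit_length computation of the prefix, using the invariant that each table entry's capacity is a power of two minus two.
import Mathlib
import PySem

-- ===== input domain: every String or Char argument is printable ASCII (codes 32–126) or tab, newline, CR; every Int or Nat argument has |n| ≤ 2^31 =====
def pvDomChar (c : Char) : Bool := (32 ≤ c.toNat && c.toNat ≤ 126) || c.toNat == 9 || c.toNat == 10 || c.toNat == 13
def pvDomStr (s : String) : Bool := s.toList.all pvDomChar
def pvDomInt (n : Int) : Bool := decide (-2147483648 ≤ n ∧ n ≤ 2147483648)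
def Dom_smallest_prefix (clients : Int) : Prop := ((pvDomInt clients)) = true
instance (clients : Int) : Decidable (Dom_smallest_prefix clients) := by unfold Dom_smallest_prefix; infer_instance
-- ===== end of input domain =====

-- B replaces A's linear scan of the threshold table with the closed form 32 - bit_length(clients+1); equivalence is about the return value (both raise SystemExit, with identical messages, outside Pre_).

-- ===== PORT A =====
def prefixThresholds : List (Int × Int) :=
  [(2, 30), (6, 29), (14, 28), (30, 27), (62, 26), (126, 25),
   (254, 24), (510, 23), (1022, 22), (2046, 21), (4094, 20)]

-- the for-loop: first entry with clients ≤ max_clients; none = fall through to the raise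
def scanThresholds (clients : Int) : List (Int × Int) → Option Int
  | [] => none
  | (maxClients, pfx) :: rest =>
      if clients ≤ maxClients then some pfx else scanThresholds clients rest

def smallest_prefix (clients : Int) : Int :=
  if clients < 1 then 0  -- SystemExit in Python: excluded by Pre_
  else (scanThresholds clients prefixThresholds).getD 0  -- none = SystemExit: excluded by Pre_

-- ===== PORT B =====
-- (clients+1).bit_length() for clients ≥ 1 is Nat.log2 (clients+1) + 1
def smallest_prefix_alt (clients : Int) : Int :=
  32 - (Nat.log2 (clients + 1).toNat + 1 : Int)

-- ===== PRECONDITION & SPEC =====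
-- Pre_ excludes exactly the inputs on which the Python A raises SystemExit (clients < 1 or clients > 4094).
def Pre_smallest_prefix (clients : Int) : Prop := 1 ≤ clients ∧ clients ≤ 4094
instance (clients : Int) : Decidable (Pre_smallest_prefix clients) := by unfold Pre_smallest_prefix; infer_instance
def pvWitness_smallest_prefix : Int := 100

def Spec_smallest_prefix (clients : Int) (out : Int) : Prop := out = smallest_prefix_alt clients
instance (clients : Int) (out : Int) : Decidable (Spec_smallest_prefix clients out) := by unfold Spec_smallest_prefix; infer_instance

-- ===== CLAIM (what is proved, stated in full; the proofs are below) =====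
def Claim_equal_smallest_prefix : Prop := ∀ (clients : Int), Dom_smallest_prefix clients → Pre_smallest_prefix clients → Spec_smallest_prefix clients (smallest_prefix clients)

-- ===== LEMMAS AND PROOFS =====

-- characterisation of Nat.log2 on a power-of-two interval
lemma log2_eq_of (n k : Nat) (h1 : 2 ^ k ≤ n) (h2 : n < 2 ^ (k + 1)) : Nat.log2 n = k := by
  rw [Nat.log2_eq_log_two]
  exact Nat.log_eq_of_pow_le_of_lt_pow h1 h2

-- ===== VERDICT (by name: the statement is the Claim_ definition above) =====
theorem smallest_prefix_spec : Claim_equal_smallest_prefix := by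
  intro clients _ hpre
  unfold Spec_smallest_prefix
  obtain ⟨h1, h2⟩ := hpre
  by_cases h : clients ≤ 2
  ·
    have hlog : Nat.log2 (clients + 1).toNat = 1 :=
      log2_eq_of _ 1 (by norm_num; omega) (by norm_num; omega)
    simp only [smallest_prefix, smallest_prefix_alt, prefixThresholds, scanThresholds, hlog]
    split_ifs <;> first | omega | norm_num
  by_cases h : clients ≤ 6
  ·
    have hlog : Nat.log2 (clients + 1).toNat = 2 :=
      log2_eq_of _ 2 (by norm_num; omega) (by norm_num; omega)
    simp only [smallest_prefix, smallest_prefix_alt, prefixThresholds, scanThresholds, hlog]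
    split_ifs <;> first | omega | norm_num
  by_cases h : clients ≤ 14
  ·
    have hlog : Nat.log2 (clients + 1).toNat = 3 :=
      log2_eq_of _ 3 (by norm_num; omega) (by norm_num; omega)
    simp only [smallest_prefix, smallest_prefix_alt, prefixThresholds, scanThresholds, hlog]
    split_ifs <;> first | omega | norm_num
  by_cases h : clients ≤ 30
  ·
    have hlog : Nat.log2 (clients + 1).toNat = 4 :=
      log2_eq_of _ 4 (by norm_num; omega) (by norm_num; omega)
    simp only [smallest_prefix, smallest_prefix_alt, prefixThresholds, scanThresholds, hlog]
    split_ifs <;> first | omega | norm_num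
  by_cases h : clients ≤ 62
  ·
    have hlog : Nat.log2 (clients + 1).toNat = 5 :=
      log2_eq_of _ 5 (by norm_num; omega) (by norm_num; omega)
    simp only [smallest_prefix, smallest_prefix_alt, prefixThresholds, scanThresholds, hlog]
    split_ifs <;> first | omega | norm_num
  by_cases h : clients ≤ 126
  ·
    have hlog : Nat.log2 (clients + 1).toNat = 6 :=
      log2_eq_of _ 6 (by norm_num; omega) (by norm_num; omega)
    simp only [smallest_prefix, smallest_prefix_alt, prefixThresholds, scanThresholds, hlog]
    split_ifs <;> first | omega | norm_num
  by_cases h : clients ≤ 254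
  ·
    have hlog : Nat.log2 (clients + 1).toNat = 7 :=
      log2_eq_of _ 7 (by norm_num; omega) (by norm_num; omega)
    simp only [smallest_prefix, smallest_prefix_alt, prefixThresholds, scanThresholds, hlog]
    split_ifs <;> first | omega | norm_num
  by_cases h : clients ≤ 510
  ·
    have hlog : Nat.log2 (clients + 1).toNat = 8 :=
      log2_eq_of _ 8 (by norm_num; omega) (by norm_num; omega)
    simp only [smallest_prefix, smallest_prefix_alt, prefixThresholds, scanThresholds, hlog]
    split_ifs <;> first | omega | norm_num
  by_cases h : clients ≤ 1022
  ·
    have hlog : Nat.log2 (clients + 1).toNat = 9 :=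
      log2_eq_of _ 9 (by norm_num; omega) (by norm_num; omega)
    simp only [smallest_prefix, smallest_prefix_alt, prefixThresholds, scanThresholds, hlog]
    split_ifs <;> first | omega | norm_num
  by_cases h : clients ≤ 2046
  ·
    have hlog : Nat.log2 (clients + 1).toNat = 10 :=
      log2_eq_of _ 10 (by norm_num; omega) (by norm_num; omega)
    simp only [smallest_prefix, smallest_prefix_alt, prefixThresholds, scanThresholds, hlog]
    split_ifs <;> first | omega | norm_num
  ·
    have hlog : Nat.log2 (clients + 1).toNat = 11 :=
      log2_eq_of _ 11 (by norm_num; omega) (by norm_num; omega)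
    simp only [smallest_prefix, smallest_prefix_alt, prefixThresholds, scanThresholds, hlog]
    split_ifs <;> first | omega | norm_num
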